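-- pv_equiv track=rewrite | github.com/dongzzi101/algorithm | 프로그래머스/1/136798. 기사단원의 무기/기사단원의 무기.py | solution
-- ===== SOURCE A (Python) =====
-- import math
--
-- def count_divisor(num):
--     count = 0
--     for i in range(1, int(math.sqrt(num)) + 1):
--         if num % i == 0:
--             count += 1
--             if i != num // i:
--                 count += 1
--     return count
--
-- def solution(number, limit, power):
--     answer = 0
--     fighters = []
--     for num in range(1, number+1):
--         count = count_divisor(num)
--         fighters.append(count)
--
--     for fighter in fighters:
--         if fighter > limit:
--             answer += power
--         else:
--             answer += fighter
--
--     return answer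
-- ===== SOURCE B (Python) =====
-- def solution(number, limit, power):
--     # Divisor-count sieve: counts[j] ends up as the number of divisors of j.
--     counts = [0] * (number + 1)
--     for i in range(1, number + 1):
--         for j in range(i, number + 1, i):
--             counts[j] += 1
--     answer = 0
--     for c in counts[1:]:
--         answer += power if c > limit else c
--     return answer
-- ===== Notes on version B (the rewrite author's own statement) =====
-- stated objective: faster
-- what changed: Replaces the per-number trial division up to sqrt(num) by a single divisor-count sieve that adds 1 to every multiple of each i, then applies the same cap-and-sum pass.
import Mathlib
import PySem

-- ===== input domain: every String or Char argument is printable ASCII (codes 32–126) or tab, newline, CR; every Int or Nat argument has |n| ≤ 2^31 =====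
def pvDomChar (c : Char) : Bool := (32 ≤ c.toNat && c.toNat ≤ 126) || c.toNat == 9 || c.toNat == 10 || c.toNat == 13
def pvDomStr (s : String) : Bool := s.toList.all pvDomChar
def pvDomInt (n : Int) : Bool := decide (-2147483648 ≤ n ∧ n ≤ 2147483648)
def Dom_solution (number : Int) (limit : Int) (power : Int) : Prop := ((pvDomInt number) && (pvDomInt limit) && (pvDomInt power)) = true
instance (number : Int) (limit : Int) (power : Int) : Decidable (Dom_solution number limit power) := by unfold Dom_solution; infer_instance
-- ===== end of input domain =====

-- B replaces A's per-number trial division up to sqrt(num) by a single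
-- divisor-count sieve over all multiples (objective: faster).

-- ===== PORT A =====
-- int(math.sqrt(num)) is ported as Nat.sqrt num.toNat: exact on Dom (for
-- 0 ≤ num ≤ 2^31 the float sqrt floors to the integer square root; every
-- call site passes num ≥ 1).
def countDivisor (num : Int) : Int :=
  (PySem.List.pyRange 1 ((Nat.sqrt num.toNat : Int) + 1) 1).foldl
    (fun count i =>
      if PySem.Int.mod num i == 0 then
        if i != PySem.Int.floordiv num i then count + 1 + 1 else count + 1
      else count) 0

def solution (number : Int) (limit : Int) (power : Int) : Int :=
  let fighters := (PySem.List.pyRange 1 (number + 1) 1).foldl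
    (fun fs num => fs ++ [countDivisor num]) ([] : List Int)
  fighters.foldl (fun answer fighter =>
    if fighter > limit then answer + power else answer + fighter) 0

-- ===== PORT B =====
-- counts[j] += 1 is ported with pySetD/pyGetD: exact, since every j produced by
-- range(i, number+1, i) is a nonnegative in-range index of counts.
def solution_alt (number : Int) (limit : Int) (power : Int) : Int :=
  let counts0 : List Int := PySem.List.pyRepeat [0] (number + 1)
  let counts := (PySem.List.pyRange 1 (number + 1) 1).foldl
    (fun cs i =>
      (PySem.List.pyRange i (number + 1) i).foldl
        (fun cs j => PySem.List.pySetD cs j (PySem.List.pyGetD cs j 0 + 1)) cs) counts0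
  (PySem.List.slice counts (some 1) none).foldl
    (fun answer c => answer + (if c > limit then power else c)) 0

-- ===== PRECONDITION & SPEC =====
def Spec_solution (number : Int) (limit : Int) (power : Int) (out : Int) : Prop := out = solution_alt number limit power
instance (number : Int) (limit : Int) (power : Int) (out : Int) : Decidable (Spec_solution number limit power out) := by unfold Spec_solution; infer_instance

-- ===== CLAIM (what is proved, stated in full; the proofs are below) =====
def Claim_equal_solution : Prop := ∀ (number : Int) (limit : Int) (power : Int), Dom_solution number limit power → Spec_solution number limit power (solution number limit power)

-- ===== LEMMAS AND PROOFS =====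

-- the increment step of the sieve
def pvInc (cs : List Int) (j : Int) : List Int :=
  PySem.List.pySetD cs j (PySem.List.pyGetD cs j 0 + 1)

theorem pvInc_fold_length (js : List Int) (cs : List Int) :
    (js.foldl pvInc cs).length = cs.length := by
  induction js generalizing cs with
  | nil => rfl
  | cons x xs ih => simp [List.foldl, ih, pvInc, PySem.List.length_pySetD]

-- a fold of increments adds the index's multiplicity
theorem pvInc_fold_get (js : List Int) (cs : List Int) (j : ℕ)
    (hall : ∀ x ∈ js, 0 ≤ x ∧ x.toNat < cs.length) (hj : j < cs.length) :
    PySem.List.pyGetD (js.foldl pvInc cs) (j : Int) 0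
      = PySem.List.pyGetD cs (j : Int) 0 + js.count (j : Int) := by
  induction js generalizing cs with
  | nil => simp
  | cons x xs ih =>
    obtain ⟨hx0, hxlen⟩ := hall x (List.mem_cons_self ..)
    have hxcast : ((x.toNat : ℕ) : Int) = x := Int.toNat_of_nonneg hx0
    have hlen' : (pvInc cs x).length = cs.length := by
      simp [pvInc, PySem.List.length_pySetD]
    have hget : PySem.List.pyGetD (pvInc cs x) (j : Int) 0
        = if j = x.toNat then PySem.List.pyGetD cs (j : Int) 0 + 1
          else PySem.List.pyGetD cs (j : Int) 0 := by
      have h := PySem.List.pyGetD_pySetD_natCast cs x.toNat j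
        (PySem.List.pyGetD cs x 0 + 1) 0 hxlen
      rw [hxcast] at h
      rw [pvInc, h]
      by_cases hc : j = x.toNat
      · subst hc; rw [hxcast]
      · simp [hc]
    rw [List.foldl_cons, ih (pvInc cs x)
        (fun y hy => ⟨(hall y (List.mem_cons_of_mem _ hy)).1,
          hlen' ▸ (hall y (List.mem_cons_of_mem _ hy)).2⟩)
        (hlen' ▸ hj), hget, List.count_cons]
    by_cases hc : j = x.toNat
    · simp [hc, hxcast]; ring
    · have hne : ¬ x = (j : Int) := by omega
      simp [hc, hne]

theorem pvNodup_pyRange_pos (a b s : Int) (hs : 0 < s) :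
    (PySem.List.pyRange a b s).Nodup := by
  rw [PySem.List.pyRange_of_pos a b hs]
  refine List.Nodup.map ?_ (List.nodup_range)
  intro p q h
  simp only at h
  have : (p : Int) = q := by
    have := h
    nlinarith [this]
  exact_mod_cast this

-- counting multiples of i in range(i, b, i)
theorem pvCount_pyRange (i b x : Int) (hi : 0 < i) :
    (PySem.List.pyRange i b i).count x
      = if i ≤ x ∧ x < b ∧ i ∣ x then 1 else 0 := by
  have hmem := @PySem.List.mem_pyRange_iff_of_pos i b i hi x
  have hdvd : (i ∣ x - i) ↔ i ∣ x := by
    constructor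
    · intro h; have := dvd_add h (dvd_refl i); simpa using this
    · intro h; exact dvd_sub h (dvd_refl i)
  by_cases h : i ≤ x ∧ x < b ∧ i ∣ x
  · rw [if_pos h]
    exact List.count_eq_one_of_mem (pvNodup_pyRange_pos i b i hi)
      (hmem.mpr ⟨h.1, h.2.1, hdvd.mpr h.2.2⟩)
  · rw [if_neg h]
    refine List.count_eq_zero_of_not_mem ?_
    intro hx
    exact h ⟨(hmem.mp hx).1, (hmem.mp hx).2.1, hdvd.mp (hmem.mp hx).2.2⟩

theorem pvSieve_len (number : Int) (is : List Int) (cs : List Int) :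
    (is.foldl (fun cs i => (PySem.List.pyRange i (number + 1) i).foldl pvInc cs) cs).length
      = cs.length := by
  induction is generalizing cs with
  | nil => rfl
  | cons i rest ih => rw [List.foldl_cons, ih, pvInc_fold_length]

-- the sieve loop: each cell accumulates its divisor count among is
theorem pvSieve_get (number : Int) (is : List Int) (cs : List Int) (j : ℕ)
    (his : ∀ i ∈ is, 1 ≤ i) (hlen : cs.length = (number + 1).toNat) (hj : j < cs.length) :
    PySem.List.pyGetD
      (is.foldl (fun cs i => (PySem.List.pyRange i (number + 1) i).foldl pvInc cs) cs) (j : Int) 0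
      = PySem.List.pyGetD cs (j : Int) 0
        + (is.countP (fun i => decide (i ≤ (j : Int) ∧ i ∣ (j : Int))) : Int) := by
  induction is generalizing cs with
  | nil => simp
  | cons i rest ih =>
    have hi : 1 ≤ i := his i (List.mem_cons_self ..)
    have hjlt : (j : Int) < number + 1 := by omega
    have hall : ∀ x ∈ PySem.List.pyRange i (number + 1) i, 0 ≤ x ∧ x.toNat < cs.length := by
      intro x hx
      have hm := (@PySem.List.mem_pyRange_iff_of_pos i (number + 1) i (by omega) x).mp hx
      constructor
      · omega
      · omega
    have hstep := pvInc_fold_get (PySem.List.pyRange i (number + 1) i) cs j hall hj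
    have hslen : ((PySem.List.pyRange i (number + 1) i).foldl pvInc cs).length = cs.length :=
      pvInc_fold_length _ _
    rw [List.foldl_cons,
        ih ((PySem.List.pyRange i (number + 1) i).foldl pvInc cs)
          (fun y hy => his y (List.mem_cons_of_mem _ hy)) (hslen.trans hlen) (hslen ▸ hj),
        hstep, pvCount_pyRange i (number + 1) (j : Int) (by omega),
        List.countP_cons]
    by_cases hc : i ≤ (j : Int) ∧ i ∣ (j : Int)
    · rw [if_pos ⟨hc.1, hjlt, hc.2⟩]
      simp [hc.1, hc.2]
      ring
    · rw [if_neg (by tauto)]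
      have : ¬ (i ≤ (j : Int) ∧ i ∣ (j : Int)) := hc
      simp [this]

theorem pvCountP_eq_card_filter_range (N : ℕ) (p : ℕ → Bool) :
    (List.range N).countP p = ((Finset.range N).filter (fun k => p k = true)).card := by
  simp [List.countP_eq_length_filter, Finset.filter, Finset.range, Multiset.range,
    Finset.card]

theorem pvCountP_range_divisors (N j : ℕ) (hj1 : 1 ≤ j) (hjN : j ≤ N) :
    (List.range N).countP (fun k => decide ((k + 1) ∣ j ∧ k + 1 ≤ j)) = j.divisors.card := by
  rw [pvCountP_eq_card_filter_range]
  have himg : j.divisors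
      = ((Finset.range N).filter (fun k => (decide ((k + 1) ∣ j ∧ k + 1 ≤ j)) = true)).image
          (· + 1) := by
    ext d
    simp only [Finset.mem_image, Finset.mem_filter, Finset.mem_range, Nat.mem_divisors,
      decide_eq_true_eq]
    constructor
    · rintro ⟨hdvd, hj0⟩
      have hd1 : 1 ≤ d := Nat.pos_of_dvd_of_pos hdvd (by omega)
      have hdj : d ≤ j := Nat.le_of_dvd (by omega) hdvd
      exact ⟨d - 1, ⟨by omega, by simpa [Nat.sub_add_cancel hd1] using hdvd,
        by omega⟩, by omega⟩
    · rintro ⟨k, ⟨hk, hdvd, hle⟩, rfl⟩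
      exact ⟨hdvd, by omega⟩
  rw [himg, Finset.card_image_of_injective _ (fun a b h => by omega)]

-- the summand of A's trial-division loop, over ℕ
def pvGN (m d : ℕ) : ℕ := if d ∣ m then (if d ≠ m / d then 2 else 1) else 0

-- the sqrt pairing argument: small divisors d pair with large divisors m / d
theorem pvPairing (m : ℕ) (hm : 1 ≤ m) :
    (∑ k ∈ Finset.range (Nat.sqrt m), pvGN m (k + 1)) = m.divisors.card := by
  have hm0 : m ≠ 0 := by omega
  set s := Nat.sqrt m with hs
  have hIcc : (∑ k ∈ Finset.range s, pvGN m (k + 1)) = ∑ d ∈ Finset.Icc 1 s, pvGN m d := by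
    have : Finset.Icc 1 s = (Finset.range s).image (· + 1) := by
      ext x
      simp only [Finset.mem_Icc, Finset.mem_image, Finset.mem_range]
      constructor
      · rintro ⟨h1, h2⟩; exact ⟨x - 1, by omega, by omega⟩
      · rintro ⟨a, ha, rfl⟩; omega
    rw [this, Finset.sum_image (fun a _ b _ h => by omega)]
  rw [hIcc]
  have hsplit : ∀ d ∈ Finset.Icc 1 s, pvGN m d
      = (if d ∣ m then 1 else 0) + (if d ∣ m ∧ d ≠ m / d then 1 else 0) := by
    intro d _
    unfold pvGN
    by_cases h1 : d ∣ m
    · by_cases h2 : d ≠ m / d <;> simp [h1, h2]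
    · simp [h1]
  rw [Finset.sum_congr rfl hsplit, Finset.sum_add_distrib, Finset.sum_boole, Finset.sum_boole]
  set S := (Finset.Icc 1 s).filter (fun d => d ∣ m) with hS
  set S' := (Finset.Icc 1 s).filter (fun d => d ∣ m ∧ d ≠ m / d) with hS'
  -- membership characterizations
  have hmemS : ∀ x, x ∈ S ↔ x ∣ m ∧ x * x ≤ m := by
    intro x
    simp only [hS, Finset.mem_filter, Finset.mem_Icc]
    constructor
    · rintro ⟨⟨h1, h2⟩, h3⟩; exact ⟨h3, Nat.le_sqrt.mp h2⟩
    · rintro ⟨h1, h2⟩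
      exact ⟨⟨Nat.pos_of_dvd_of_pos h1 (by omega), Nat.le_sqrt.mpr h2⟩, h1⟩
  have hmemS' : ∀ x, x ∈ S' ↔ x ∣ m ∧ x * x ≤ m ∧ x ≠ m / x := by
    intro x
    simp only [hS', Finset.mem_filter, Finset.mem_Icc]
    constructor
    · rintro ⟨⟨h1, h2⟩, h3, h4⟩; exact ⟨h3, Nat.le_sqrt.mp h2, h4⟩
    · rintro ⟨h1, h2, h3⟩
      exact ⟨⟨Nat.pos_of_dvd_of_pos h1 (by omega), Nat.le_sqrt.mpr h2⟩, h1, h3⟩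
  have hunion : m.divisors = S ∪ S'.image (fun d => m / d) := by
    ext x
    simp only [Nat.mem_divisors, Finset.mem_union, Finset.mem_image]
    constructor
    · rintro ⟨hdvd, -⟩
      by_cases hsq : x * x ≤ m
      · exact Or.inl ((hmemS x).mpr ⟨hdvd, hsq⟩)
      · right
        have hx0 : 0 < x := Nat.pos_of_dvd_of_pos hdvd (by omega)
        have hxm : x ≤ m := Nat.le_of_dvd (by omega) hdvd
        set d := m / x with hd
        have hdx : d * x = m := Nat.div_mul_cancel hdvd
        have hddvd : d ∣ m := ⟨x, hdx.symm⟩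
        have hd1 : 1 ≤ d := Nat.one_le_div_iff hx0 |>.mpr hxm
        have hdlt : d < x := Nat.div_lt_of_lt_mul (by omega)
        have hdd : d * d ≤ m := by nlinarith
        have hmd : m / d = x := Nat.div_div_self hdvd hm0
        refine ⟨d, (hmemS' d).mpr ⟨hddvd, hdd, by omega⟩, hmd⟩
    · rintro (hx | ⟨d, hd, rfl⟩)
      · exact ⟨((hmemS x).mp hx).1, hm0⟩
      · obtain ⟨h1, -, -⟩ := (hmemS' d).mp hd
        exact ⟨Nat.div_dvd_of_dvd h1, hm0⟩
  have hdisj : Disjoint S (S'.image (fun d => m / d)) := by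
    rw [Finset.disjoint_left]
    rintro x hxS hximg
    obtain ⟨hxdvd, hxsq⟩ := (hmemS x).mp hxS
    obtain ⟨d, hd, hdx⟩ := Finset.mem_image.mp hximg
    obtain ⟨hddvd, hdd, hdne⟩ := (hmemS' d).mp hd
    have hd0 : 0 < d := Nat.pos_of_dvd_of_pos hddvd (by omega)
    have hmdd : d * (m / d) = m := Nat.mul_div_cancel' hddvd
    have hdle : d ≤ m / d := Nat.le_of_mul_le_mul_left (by omega) hd0
    have hx0 : 0 < x := Nat.pos_of_dvd_of_pos hxdvd (by omega)
    -- x = m / d, d < x, m = d * x < x * x ≤ m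
    have : d < x := by omega
    nlinarith
  have hinj : Set.InjOn (fun d => m / d) S' := by
    rintro d1 h1 d2 h2 h
    obtain ⟨hd1, -, -⟩ := (hmemS' d1).mp h1
    obtain ⟨hd2, -, -⟩ := (hmemS' d2).mp h2
    have e1 : m / (m / d1) = d1 := Nat.div_div_self hd1 hm0
    have e2 : m / (m / d2) = d2 := Nat.div_div_self hd2 hm0
    simp only at h
    rw [← e1, ← e2, h]
  rw [hunion, Finset.card_union_of_disjoint hdisj, Finset.card_image_of_injOn hinj]
  simp

theorem pvListSum_range (n : ℕ) (f : ℕ → ℕ) :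
    ((List.range n).map f).sum = ∑ k ∈ Finset.range n, f k := by
  induction n with
  | zero => simp
  | succ n ih => simp [List.range_succ, Finset.sum_range_succ, ih]

-- A's trial division computes the divisor count
theorem pvCountDivisor_eq (m : ℕ) (hm : 1 ≤ m) :
    countDivisor (m : Int) = (m.divisors.card : Int) := by
  have hbody : (fun (count i : Int) =>
      if PySem.Int.mod (m : Int) i == 0 then
        if i != PySem.Int.floordiv (m : Int) i then count + 1 + 1 else count + 1
      else count)
      = fun (count i : Int) => count +
        (if PySem.Int.mod (m : Int) i = 0 then
          (if i ≠ PySem.Int.floordiv (m : Int) i then 2 else 1) else 0) := by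
    funext c i
    simp only [beq_iff_eq, bne_iff_ne]
    split_ifs <;> ring
  rw [countDivisor, hbody, PySem.List.foldl_add]
  have htn : ((m : Int)).toNat = m := by omega
  rw [htn]
  set s := Nat.sqrt m with hs
  have hrange : ((s : Int) + 1 - 1).toNat = s := by omega
  rw [PySem.List.pyRange_one, hrange, List.map_map]
  have hfun : ((fun i => if PySem.Int.mod (m : Int) i = 0 then
        (if i ≠ PySem.Int.floordiv (m : Int) i then (2:Int) else 1) else 0) ∘ fun k : ℕ => 1 + (k : Int))
      = fun k : ℕ => (pvGN m (k + 1) : Int) := by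
    funext k
    have hcast : (1 : Int) + (k : ℕ) = ((k + 1 : ℕ) : Int) := by push_cast; ring
    simp only [Function.comp, hcast, PySem.Int.mod_natCast, PySem.Int.floordiv_natCast]
    have e1 : (((m % (k + 1) : ℕ) : Int) = 0) ↔ (k + 1) ∣ m := by
      rw [Int.natCast_eq_zero]
      exact (Nat.dvd_iff_mod_eq_zero ..).symm
    have e2 : (((k + 1 : ℕ) : Int) = ((m / (k + 1) : ℕ) : Int)) ↔ (k + 1) = m / (k + 1) :=
      Int.natCast_inj
    by_cases hd : (k + 1) ∣ m
    · by_cases hne : (k + 1) = m / (k + 1)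
      · rw [if_pos (e1.mpr hd), if_neg (fun h => h (e2.mpr hne)), pvGN, if_pos hd,
          if_neg (fun h => h hne)]
        norm_num
      · rw [if_pos (e1.mpr hd), if_pos (fun h => hne (e2.mp h)), pvGN, if_pos hd, if_pos hne]
        norm_num
    · rw [if_neg (fun h => hd (e1.mp h)), pvGN, if_neg hd]
      norm_num
  rw [hfun]
  have hcastsum : ∀ (l : List ℕ) (f : ℕ → ℕ),
      ((l.map (fun k => (f k : Int))).sum) = (((l.map f).sum : ℕ) : Int) := by
    intro l f
    induction l with
    | nil => simp
    | cons a t ih => simp [ih]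
  rw [hcastsum, pvListSum_range, pvPairing m hm]
  simp

theorem pvMain (number limit power : Int) :
    solution number limit power = solution_alt number limit power := by
  unfold solution solution_alt
  dsimp only
  rw [show (fun (cs : List Int) (j : Int) =>
      PySem.List.pySetD cs j (PySem.List.pyGetD cs j 0 + 1)) = pvInc from rfl]
  rw [PySem.List.foldl_append_singleton_eq_map, List.nil_append]
  rw [PySem.List.pyRepeat_singleton]
  set cf := (PySem.List.pyRange 1 (number + 1) 1).foldl
    (fun cs i => (PySem.List.pyRange i (number + 1) i).foldl pvInc cs)
    (List.replicate (number + 1).toNat (0 : Int)) with hcf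
  have hcflen : cf.length = (number + 1).toNat := by
    rw [hcf, pvSieve_len, List.length_replicate]
  have hlist : PySem.List.slice cf (some 1) none = (PySem.List.pyRange 1 (number + 1) 1).map countDivisor := by
    rw [PySem.List.slice_from cf (show (0:Int) ≤ 1 by norm_num), show ((1:Int).toNat) = 1 from rfl]
    apply List.ext_getElem
    · rw [List.length_drop, hcflen, List.length_map, PySem.List.length_pyRange_one]
      omega
    · intro k hk1 hk2
      have hkN : k < number.toNat := by
        rw [List.length_map, PySem.List.length_pyRange_one] at hk2; omega
      have hnum0 : 0 ≤ number := by omega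
      -- right side
      rw [List.getElem_map, PySem.List.getElem_pyRange_one]
      have hc1 : (1 : Int) + (k : ℕ) = ((k + 1 : ℕ) : Int) := by push_cast; ring
      rw [hc1, pvCountDivisor_eq (k + 1) (by omega)]
      -- left side
      rw [List.getElem_drop]
      have hlt : 1 + k < cf.length := by omega
      have hgd : cf[1 + k]'hlt = PySem.List.pyGetD cf ((1 + k : ℕ) : Int) 0 := by
        rw [PySem.List.pyGetD_natCast, List.getD_eq_getElem _ _ hlt]
      rw [hgd, hcf, pvSieve_get number _ _ (1 + k)
        (fun i hi => ((PySem.List.mem_pyRange_one ..).mp hi).1)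
        (by simp) (by simp; omega)]
      have hzero : PySem.List.pyGetD (List.replicate (number + 1).toNat (0 : Int))
          ((1 + k : ℕ) : Int) 0 = 0 := by
        rw [PySem.List.pyGetD_natCast]
        simp [List.getD]
      rw [hzero, zero_add]
      -- count the divisors among the sieve indices
      have hcp : (PySem.List.pyRange 1 (number + 1) 1).countP
            (fun i => decide (i ≤ ((1 + k : ℕ) : Int) ∧ i ∣ ((1 + k : ℕ) : Int)))
          = (List.range number.toNat).countP
            (fun t => decide ((t + 1) ∣ (k + 1) ∧ t + 1 ≤ k + 1)) := by
        rw [PySem.List.pyRange_one, List.countP_map]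
        have : ((number + 1 - 1 : Int)).toNat = number.toNat := by omega
        rw [this]
        apply List.countP_congr
        intro t _
        simp only [Function.comp]
        simp only [decide_eq_true_eq]
        have hct : (1 : Int) + (t : ℕ) = ((t + 1 : ℕ) : Int) := by push_cast; ring
        have hck : ((1 + k : ℕ) : Int) = ((k + 1 : ℕ) : Int) := by norm_num [Nat.add_comm]
        rw [hct, hck, Int.natCast_dvd_natCast, Nat.cast_le]
        tauto
      rw [hcp, pvCountP_range_divisors number.toNat (k + 1) (by omega) (by omega)]
  rw [hlist]
  have hfn : (fun (answer fighter : Int) =>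
      if fighter > limit then answer + power else answer + fighter)
      = fun (answer c : Int) => answer + (if c > limit then power else c) := by
    funext a c
    split_ifs <;> ring
  rw [hfn]

-- ===== VERDICT (by name: the statement is the Claim_ definition above) =====
theorem solution_spec : Claim_equal_solution := by
  intro number limit power _
  unfold Spec_solution
  exact pvMain number limit power
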